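-- pv_equiv track=rewrite | github.com/kftlfd/leetcode | 2025/12/1425-2147-NumberOfWaysToDivideALongCorridor.py | numberOfWays
-- ===== SOURCE A (Python) =====
-- def numberOfWays(corridor: str) -> int:
--     # Store 1000000007 in a variable for convenience
--     MOD = 1_000_000_007
--
--     # Initial values of three variables
--     zero = 0
--     one = 0
--     two = 1
--
--     # Compute using derived equations
--     for thing in corridor:
--         if thing == "S":
--             zero = one
--             one, two = two, one
--         else:
--             two = (two + zero) % MOD
--
--     # Return the result
--     return zero
-- ===== SOURCE B (Python) =====
-- def numberOfWays(corridor: str) -> int: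
--     # Collect seat positions, then multiply the gaps between consecutive seat pairs.
--     seats = [i for i, c in enumerate(corridor) if c == "S"]
--     if not seats or len(seats) % 2 == 1:
--         return 0
--     res = 1
--     gaps = seats[1:]
--     while len(gaps) > 1:
--         res = res * (gaps[1] - gaps[0]) % 1_000_000_007
--         gaps = gaps[2:]
--     return res
-- ===== Notes on version B (the rewrite author's own statement) =====
-- stated objective: alternative
-- what changed: Replaced A's per-character three-variable rolling DP with collecting the seat positions once, guarding on empty/odd seat count, and multiplying the gaps between consecutive seat pairs modulo 1_000_000_007.
import Mathlib
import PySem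

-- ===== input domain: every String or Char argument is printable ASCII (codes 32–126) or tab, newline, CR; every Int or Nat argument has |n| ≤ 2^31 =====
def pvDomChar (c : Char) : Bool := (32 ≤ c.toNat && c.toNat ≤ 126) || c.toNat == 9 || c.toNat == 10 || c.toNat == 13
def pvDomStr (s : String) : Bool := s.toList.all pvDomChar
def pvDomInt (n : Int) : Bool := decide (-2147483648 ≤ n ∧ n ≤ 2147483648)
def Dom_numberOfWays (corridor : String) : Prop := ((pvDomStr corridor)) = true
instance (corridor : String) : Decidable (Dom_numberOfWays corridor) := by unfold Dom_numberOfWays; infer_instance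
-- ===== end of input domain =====

-- B replaces A's per-character three-variable rolling DP by collecting seat positions and
-- multiplying the gaps between consecutive seat pairs (objective: simpler/alternative, same cost).

-- ===== PORT A =====
-- one loop step of A: state (zero, one, two)
def pvStepA (s : Int × Int × Int) (c : Char) : Int × Int × Int :=
  if c = 'S' then (s.2.1, s.2.2, s.2.1)
  else (s.1, s.2.1, PySem.Int.mod (s.2.2 + s.1) 1000000007)

def numberOfWays (corridor : String) : Int :=
  (corridor.toList.foldl pvStepA (0, 0, 1)).1

-- ===== PORT B =====
-- the while loop of Source B: consume `gaps` two at a time, multiplying in (gaps[1]-gaps[0]) mod 1e9+7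
def pvPairsFold (acc : Int) : List Int → Int
  | a :: b :: rest => pvPairsFold (PySem.Int.mod (acc * (b - a)) 1000000007) rest
  | _ => acc

def numberOfWays_alt (corridor : String) : Int :=
  let seats := ((PySem.List.enumerate corridor.toList 0).filter (fun p => p.2 == 'S')).map (fun p => p.1)
  if seats = [] ∨ seats.length % 2 = 1 then 0
  else pvPairsFold 1 (seats.drop 1)

-- ===== PRECONDITION & SPEC =====
def Spec_numberOfWays (corridor : String) (out : Int) : Prop := out = numberOfWays_alt corridor
instance (corridor : String) (out : Int) : Decidable (Spec_numberOfWays corridor out) := by unfold Spec_numberOfWays; infer_instance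

-- ===== CLAIM (what is proved, stated in full; the proofs are below) =====
def Claim_equal_numberOfWays : Prop := ∀ (corridor : String), Dom_numberOfWays corridor → Spec_numberOfWays corridor (numberOfWays corridor)

-- ===== LEMMAS AND PROOFS =====

-- phase-structured versions of A's fold: pvGZ = no seat seen yet, pvGO x = odd number
-- of seats seen (accumulator x), pvGE q t = positive even number seen (answer-so-far q, pending t)
mutual
def pvGO (x : Int) : List Char → Int × Int × Int
  | [] => (0, x, 0)
  | c :: l => if c = 'S' then pvGE x x l else pvGO x l
def pvGE (q t : Int) : List Char → Int × Int × Int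
  | [] => (q, 0, t)
  | c :: l => if c = 'S' then pvGO t l else pvGE q (PySem.Int.mod (t + q) 1000000007) l
end

def pvGZ : List Char → Int × Int × Int
  | [] => (0, 0, 1)
  | c :: l => if c = 'S' then pvGO 1 l else pvGZ l

-- positions (starting at offset k) of the 'S' characters
def pvPos (k : Int) : List Char → List Int
  | [] => []
  | c :: l => if c = 'S' then k :: pvPos (k + 1) l else pvPos (k + 1) l

lemma pvmod_eq (a : Int) : PySem.Int.mod a 1000000007 = a % 1000000007 :=
  PySem.Int.mod_eq_emod_of_pos (by norm_num)

lemma foldA_GO_GE (l : List Char) :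
    (∀ x, l.foldl pvStepA (0, x, 0) = pvGO x l) ∧
    (∀ q t, l.foldl pvStepA (q, 0, t) = pvGE q t l) := by
  induction l with
  | nil => exact ⟨fun x => rfl, fun q t => rfl⟩
  | cons c l ih =>
    constructor
    · intro x
      by_cases h : c = 'S'
      · simp [List.foldl, pvStepA, pvGO, h, ih.2]
      · simpa [List.foldl, pvStepA, pvGO, h, pvmod_eq] using ih.1 x
    · intro q t
      by_cases h : c = 'S'
      · simp [List.foldl, pvStepA, pvGE, h, ih.1]
      · simp [List.foldl, pvStepA, pvGE, h, ih.2]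

lemma foldA_GZ (l : List Char) : l.foldl pvStepA (0, 0, 1) = pvGZ l := by
  induction l with
  | nil => rfl
  | cons c l ih =>
    by_cases h : c = 'S'
    · simp [List.foldl, pvStepA, pvGZ, h, (foldA_GO_GE l).1]
    · simpa [List.foldl, pvStepA, pvGZ, h, pvmod_eq] using ih

lemma pvPos_length (l : List Char) : ∀ k, (pvPos k l).length = l.count 'S' := by
  induction l with
  | nil => intro k; rfl
  | cons c l ih =>
    intro k
    by_cases h : c = 'S' <;> simp [pvPos, h, ih]

lemma seats_eq (l : List Char) : ∀ k,
    ((PySem.List.enumerate l k).filter (fun p => p.2 == 'S')).map (fun p => p.1) = pvPos k l := by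
  induction l with
  | nil => intro k; simp [PySem.List.enumerate_nil, pvPos]
  | cons c l ih =>
    intro k
    by_cases h : c = 'S' <;> simp [PySem.List.enumerate_cons, pvPos, h, ih]

lemma main_GO_GE (l : List Char) :
    (∀ (k x : Int), 0 ≤ x → x < 1000000007 →
      (pvGO x l).1 = if l.count 'S' % 2 = 0 then 0 else pvPairsFold x (pvPos k l)) ∧
    (∀ (k q t : Int), 0 ≤ t → t < 1000000007 →
      (pvGE q t l).1 = if l.count 'S' % 2 = 1 then 0
        else match pvPos k l with
          | [] => q
          | r0 :: rest => pvPairsFold ((t + q * (r0 - k)) % 1000000007) rest) := by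
  induction l with
  | nil =>
    refine ⟨fun k x _ _ => rfl, fun k q t _ _ => rfl⟩
  | cons c l ih =>
    constructor
    · intro k x hx0 hx1
      by_cases h : c = 'S'
      · subst h
        rw [show pvGO x ('S' :: l) = pvGE x x l from by simp [pvGO],
            ih.2 (k + 1) x x hx0 hx1, List.count_cons_self,
            show pvPos k ('S' :: l) = k :: pvPos (k + 1) l from by simp [pvPos]]
        by_cases hp : l.count 'S' % 2 = 1
        · rw [if_pos hp, if_pos (by omega)]
        · rw [if_neg hp, if_neg (show ¬ (l.count 'S' + 1) % 2 = 0 by omega)]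
          rcases he : pvPos (k + 1) l with _ | ⟨r0, rest⟩
          · simp [pvPairsFold]
          · show pvPairsFold ((x + x * (r0 - (k + 1))) % 1000000007) rest
              = pvPairsFold x (k :: r0 :: rest)
            rw [show pvPairsFold x (k :: r0 :: rest)
                  = pvPairsFold (PySem.Int.mod (x * (r0 - k)) 1000000007) rest from rfl, pvmod_eq]
            congr 1
            have hq : x * (r0 - k) = x + x * (r0 - (k + 1)) := by ring
            rw [hq]
      · rw [show pvGO x (c :: l) = pvGO x l from by simp [pvGO, h],
            ih.1 (k + 1) x hx0 hx1, List.count_cons_of_ne h,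
            show pvPos k (c :: l) = pvPos (k + 1) l from by simp [pvPos, h]]
    · intro k q t ht0 ht1
      by_cases h : c = 'S'
      · subst h
        rw [show pvGE q t ('S' :: l) = pvGO t l from by simp [pvGE],
            ih.1 (k + 1) t ht0 ht1, List.count_cons_self,
            show pvPos k ('S' :: l) = k :: pvPos (k + 1) l from by simp [pvPos]]
        by_cases hp : l.count 'S' % 2 = 0
        · rw [if_pos hp, if_pos (by omega)]
        · rw [if_neg hp, if_neg (show ¬ (l.count 'S' + 1) % 2 = 1 by omega)]
          show pvPairsFold t (pvPos (k + 1) l)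
            = pvPairsFold ((t + q * (k - k)) % 1000000007) (pvPos (k + 1) l)
          have hmod : (t + q * (k - k)) % 1000000007 = t := by
            have h1 : t + q * (k - k) = t := by ring
            rw [h1]; exact Int.emod_eq_of_lt ht0 ht1
          rw [hmod]
      · have hb0 : 0 ≤ (t + q) % 1000000007 := Int.emod_nonneg _ (by norm_num)
        have hb1 : (t + q) % 1000000007 < 1000000007 := Int.emod_lt_of_pos _ (by norm_num)
        rw [show pvGE q t (c :: l)
              = pvGE q (PySem.Int.mod (t + q) 1000000007) l from by simp [pvGE, h], pvmod_eq,
            ih.2 (k + 1) q ((t + q) % 1000000007) hb0 hb1, List.count_cons_of_ne h,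
            show pvPos k (c :: l) = pvPos (k + 1) l from by simp [pvPos, h]]
        by_cases hp : l.count 'S' % 2 = 1
        · rw [if_pos hp, if_pos hp]
        · rw [if_neg hp, if_neg hp]
          rcases he : pvPos (k + 1) l with _ | ⟨r0, rest⟩
          · rfl
          · show pvPairsFold (((t + q) % 1000000007 + q * (r0 - (k + 1))) % 1000000007) rest
              = pvPairsFold ((t + q * (r0 - k)) % 1000000007) rest
            congr 1
            have hq : t + q * (r0 - k) = (t + q) + q * (r0 - (k + 1)) := by ring
            rw [hq]
            generalize q * (r0 - (k + 1)) = b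
            omega

lemma GZ_eval (l : List Char) : ∀ k, (pvGZ l).1 =
    if l.count 'S' = 0 ∨ l.count 'S' % 2 = 1 then 0
    else pvPairsFold 1 (List.drop 1 (pvPos k l)) := by
  induction l with
  | nil => intro k; rfl
  | cons c l ih =>
    intro k
    by_cases h : c = 'S'
    · subst h
      rw [show pvGZ ('S' :: l) = pvGO 1 l from by simp [pvGZ],
          (main_GO_GE l).1 (k + 1) 1 (by norm_num) (by norm_num), List.count_cons_self,
          show pvPos k ('S' :: l) = k :: pvPos (k + 1) l from by simp [pvPos]]
      by_cases hp : l.count 'S' % 2 = 0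
      · rw [if_pos hp, if_pos (by omega)]
      · rw [if_neg hp, if_neg (show ¬ (l.count 'S' + 1 = 0 ∨ (l.count 'S' + 1) % 2 = 1) by omega)]
        rfl
    · rw [show pvGZ (c :: l) = pvGZ l from by simp [pvGZ, h], ih (k + 1),
          List.count_cons_of_ne h,
          show pvPos k (c :: l) = pvPos (k + 1) l from by simp [pvPos, h]]

-- ===== VERDICT (by name: the statement is the Claim_ definition above) =====
theorem numberOfWays_spec : Claim_equal_numberOfWays := by
  intro corridor _
  unfold Spec_numberOfWays numberOfWays numberOfWays_alt
  rw [foldA_GZ, GZ_eval corridor.toList 0, seats_eq corridor.toList 0]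
  have hlen := pvPos_length corridor.toList 0
  by_cases h0 : corridor.toList.count 'S' = 0
  · have : pvPos 0 corridor.toList = [] := by
      have := pvPos_length corridor.toList 0
      rw [h0] at this; exact List.length_eq_zero_iff.mp this
    simp [h0, this]
  · have hne : pvPos 0 corridor.toList ≠ [] := by
      intro hcon; rw [hcon] at hlen; simp at hlen; omega
    by_cases hp : corridor.toList.count 'S' % 2 = 1
    · simp [h0, hp, hne, hlen]
    · simp [h0, hp, hne, hlen]
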